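-- pv_equiv track=rewrite | github.com/pypi-data/pypi-mirror-391 | packages/owl-iri-code-generator/owl_iri_code_generator-0.8.20-py3-none-any.whl/nl/newfoundland/kgworkflow/generator/iri/manchester.py | _needs_parens
-- ===== SOURCE A (Python) =====
-- def _needs_parens(txt: str) -> bool:
--     t = txt.strip()
--     if (t.startswith("(") and t.endswith(")")) or t == "Thing" or t == "Nothing":
--         return False
--     for kw in [" and ", " or ", " not ", " some ", " only ", " value ", " min ", " max ", " exactly "]:
--         if kw.strip() in t and kw in f" {t} ":
--             return True
--     # also if contains a space (labels with spaces) in composite contexts we'll add explicitly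
--     return False
-- ===== SOURCE B (Python) =====
-- _KEYWORDS = frozenset(["and", "or", "not", "some", "only", "value", "min", "max", "exactly"])
--
--
-- def _needs_parens(txt: str) -> bool:
--     t = txt.strip()
--     if t.startswith("(") and t.endswith(")"):
--         return False
--     if t == "Thing":
--         return False
--     if t == "Nothing":
--         return False
--     # single left-to-right scan: collect each space-delimited token and test it
--     # against the keyword set the moment it is completed
--     word = []
--     for c in t + " ":
--         if c == " ":
--             if "".join(word) in _KEYWORDS:
--                 return True
--             word = []
--         else:
--             word.append(c)
--     return False
-- ===== Notes on version B (the rewrite author's own statement) =====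
-- stated objective: alternative
-- what changed: A's nine padded-substring scans over the whole text are replaced by one left-to-right character scan with a token accumulator that tests each completed space-delimited token against a fixed keyword set.
import Mathlib
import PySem

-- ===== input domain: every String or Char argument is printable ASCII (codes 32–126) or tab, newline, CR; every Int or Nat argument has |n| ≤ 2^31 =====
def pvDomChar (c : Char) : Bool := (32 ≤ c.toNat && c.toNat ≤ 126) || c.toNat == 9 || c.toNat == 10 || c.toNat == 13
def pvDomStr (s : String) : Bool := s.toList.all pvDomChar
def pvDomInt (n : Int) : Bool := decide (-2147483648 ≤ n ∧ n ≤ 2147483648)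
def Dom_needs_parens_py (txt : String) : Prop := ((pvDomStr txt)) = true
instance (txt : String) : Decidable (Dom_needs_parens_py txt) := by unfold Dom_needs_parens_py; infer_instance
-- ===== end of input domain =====

-- B replaces A's nine padded-substring scans by a single left-to-right character scan that
-- tests each completed space-delimited token against a fixed keyword set (objective: alternative).

-- ===== PORT A =====
-- the keyword list of A's for-loop, as lists of chars
def pvKwsA : List (List Char) :=
  [" and ".toList, " or ".toList, " not ".toList, " some ".toList, " only ".toList,
   " value ".toList, " min ".toList, " max ".toList, " exactly ".toList]

def needs_parens_py (txt : String) : Bool :=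
  let t := PySem.Chars.strip txt.toList
  if (PySem.Chars.startswith t "(".toList && PySem.Chars.endswith t ")".toList)
      || t == "Thing".toList || t == "Nothing".toList then false
  else
    -- for kw in [...]: if kw.strip() in t and kw in f" {t} ": return True  /  return False
    pvKwsA.any (fun kw =>
      PySem.Chars.isIn (PySem.Chars.strip kw) t &&
      PySem.Chars.isIn kw ([' '] ++ t ++ [' ']))

-- ===== PORT B =====
-- _KEYWORDS = frozenset({"and", "or", "not", "some", "only", "value", "min", "max", "exactly"})
def pvKwSet : PySem.Set (List Char) :=
  PySem.Set.ofList
    ["and".toList, "or".toList, "not".toList, "some".toList, "only".toList,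
     "value".toList, "min".toList, "max".toList, "exactly".toList]

-- the for-loop of Source B: `word` is the accumulator (chars pushed in front, so `word.reverse`
-- is Python's "".join(word)); on a space the completed token is tested and the loop may
-- return True early, otherwise the accumulator is reset
def pvScan : List Char → List Char → Bool
  | [], _ => false
  | c :: cs, word =>
    if c = ' ' then
      if PySem.Set.contains pvKwSet word.reverse then true else pvScan cs []
    else pvScan cs (c :: word)

def needs_parens_py_alt (txt : String) : Bool :=
  let t := PySem.Chars.strip txt.toList
  if PySem.Chars.startswith t "(".toList && PySem.Chars.endswith t ")".toList then false
  else if t == "Thing".toList then false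
  else if t == "Nothing".toList then false
  else pvScan (t ++ [' ']) []

-- ===== PRECONDITION & SPEC =====
def Spec_needs_parens_py (txt : String) (out : Bool) : Prop := out = needs_parens_py_alt txt
instance (txt : String) (out : Bool) : Decidable (Spec_needs_parens_py txt out) := by unfold Spec_needs_parens_py; infer_instance

-- ===== CLAIM (what is proved, stated in full; the proofs are below) =====
def Claim_equal_needs_parens_py : Prop := ∀ (txt : String), Dom_needs_parens_py txt → Spec_needs_parens_py txt (needs_parens_py txt)

-- ===== LEMMAS AND PROOFS =====

def pvTokens : List Char → List (List Char)
  | [] => [[]]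
  | c :: rest =>
    if c = ' ' then [] :: pvTokens rest
    else
      match pvTokens rest with
      | [] => [[c]]
      | h :: ts => (c :: h) :: ts

theorem pvTokens_ne_nil (l : List Char) : pvTokens l ≠ [] := by
  cases l with
  | nil => simp [pvTokens]
  | cons c rest =>
    simp only [pvTokens]
    split
    · simp
    · split <;> simp

theorem pvTokens_head_prefix (t : List Char) : (pvTokens t).headI <+: t := by
  induction t with
  | nil => simp [pvTokens]
  | cons c rest ih =>
    simp only [pvTokens]
    split
    · simp
    · obtain ⟨hh, ts, htk⟩ := List.exists_cons_of_ne_nil (pvTokens_ne_nil rest)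
      rw [htk]
      rw [htk] at ih
      simpa using ih

theorem pvTokens_mem_infix {x : List Char} {t : List Char} (hx : x ∈ pvTokens t) : x <:+: t := by
  induction t generalizing x with
  | nil => simp [pvTokens] at hx; simp [hx]
  | cons c rest ih =>
    simp only [pvTokens] at hx
    split at hx
    · rcases List.mem_cons.1 hx with h | h
      · simp [h]
      · exact (ih h).trans (List.infix_cons (List.infix_refl rest))
    · obtain ⟨hh, ts, htk⟩ := List.exists_cons_of_ne_nil (pvTokens_ne_nil rest)
      rw [htk] at hx
      rcases List.mem_cons.1 hx with h | h
      · subst h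
        have : hh <+: rest := by
          have := pvTokens_head_prefix rest
          rwa [htk] at this
        exact (List.cons_prefix_cons.mpr ⟨rfl, this⟩).isInfix
      · have : x ∈ pvTokens rest := by rw [htk]; exact List.mem_cons_of_mem _ h
        exact (ih this).trans (List.infix_cons (List.infix_refl rest))

theorem pv_app_eq {w tok b r : List Char} (hw : ' ' ∉ w) (htok : ' ' ∉ tok)
    (h : w ++ ' ' :: b = tok ++ ' ' :: r) : w = tok ∧ b = r := by
  induction w generalizing tok with
  | nil =>
    cases tok with
    | nil => simpa using h
    | cons d tok' =>
      simp only [List.nil_append, List.cons_append, List.cons.injEq] at h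
      exact absurd (h.1 ▸ List.mem_cons_self) htok
  | cons c w' ih =>
    cases tok with
    | nil =>
      simp only [List.cons_append, List.nil_append, List.cons.injEq] at h
      exact absurd (h.1 ▸ List.mem_cons_self) hw
    | cons d tok' =>
      simp only [List.cons_append, List.cons.injEq] at h
      have := ih (fun hm => hw (List.mem_cons_of_mem _ hm)) (fun hm => htok (List.mem_cons_of_mem _ hm)) h.2
      exact ⟨by rw [h.1, this.1], this.2⟩

theorem pv_rec {w b rest : List Char} (a tok : List Char) (htok : ' ' ∉ tok)
    (h : a ++ ' ' :: w ++ ' ' :: b = tok ++ ' ' :: rest ++ [' ']) :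
    (' ' :: w ++ [' ']) <:+: (' ' :: rest ++ [' ']) := by
  induction tok generalizing a with
  | nil =>
    simp only [List.nil_append] at h
    exact ⟨a, b, by rw [← h]; simp⟩
  | cons d tok' ih =>
    cases a with
    | nil =>
      simp only [List.nil_append, List.cons_append, List.cons.injEq] at h
      exact absurd (h.1 ▸ List.mem_cons_self) htok
    | cons e a' =>
      simp only [List.cons_append, List.cons.injEq] at h
      exact ih a' (fun hm => htok (List.mem_cons_of_mem _ hm)) h.2

theorem pvTokens_nospace {t : List Char} (ht : ' ' ∉ t) : pvTokens t = [t] := by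
  induction t with
  | nil => simp [pvTokens]
  | cons c rest ih =>
    have hc : c ≠ ' ' := fun h => ht (h ▸ List.mem_cons_self)
    have := ih (fun hm => ht (List.mem_cons_of_mem _ hm))
    simp [pvTokens, hc, this]

theorem pvTokens_split {tok rest : List Char} (htok : ' ' ∉ tok) :
    pvTokens (tok ++ ' ' :: rest) = tok :: pvTokens rest := by
  induction tok with
  | nil => simp [pvTokens]
  | cons c tok' ih =>
    have hc : c ≠ ' ' := fun h => htok (h ▸ List.mem_cons_self)
    have := ih (fun hm => htok (List.mem_cons_of_mem _ hm))
    simp [pvTokens, hc, this]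

theorem pv_key_nospace {w t : List Char} (hw : ' ' ∉ w) (ht : ' ' ∉ t) :
    ((' ' :: w ++ [' ']) <:+: (' ' :: t ++ [' ']) ↔ w = t) := by
  constructor
  · rintro ⟨a, b, hab⟩
    cases a with
    | nil =>
      simp only [List.nil_append, List.cons_append, List.cons.injEq, List.append_assoc] at hab
      have h2 : w ++ ' ' :: b = t ++ ' ' :: ([] : List Char) := by
        simpa using hab.2
      exact (pv_app_eq hw ht h2).1
    | cons c a' =>
      exfalso
      simp only [List.cons_append, List.cons.injEq] at hab
      have h2 : t ++ [' '] = a' ++ ' ' :: w ++ ' ' :: b := by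
        simpa [List.append_assoc] using hab.2.symm
      have hcount := congrArg (List.count ' ') h2
      simp [List.count_append, List.count_eq_zero.mpr hw,
        List.count_eq_zero.mpr ht] at hcount
      omega
  · rintro rfl
    exact List.infix_refl _

theorem pv_key (w : List Char) (hw : ' ' ∉ w) :
    ∀ n t, t.length ≤ n →
      ((' ' :: w ++ [' ']) <:+: (' ' :: t ++ [' ']) ↔ w ∈ pvTokens t) := by
  intro n
  induction n with
  | zero =>
    intro t hlen
    have ht : t = [] := List.eq_nil_of_length_eq_zero (Nat.le_zero.1 hlen)
    subst ht
    rw [pvTokens_nospace (List.not_mem_nil)]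
    simp only [List.mem_singleton]
    exact pv_key_nospace hw (List.not_mem_nil)
  | succ n ih =>
    intro t hlen
    by_cases hsp : ' ' ∈ t
    · obtain ⟨d, rest, hdw⟩ := List.exists_cons_of_ne_nil
        (l := t.dropWhile (· ≠ ' '))
        (by intro hnil
            rw [List.dropWhile_eq_nil_iff] at hnil
            simpa using hnil ' ' hsp)
      have hd : d = ' ' := by
        have h := List.head_dropWhile_not (· ≠ ' ') (l := t) (by rw [hdw]; exact List.cons_ne_nil d rest)
        simp only [hdw, List.head_cons] at h
        simpa using h
      subst hd
      have hsplit : t = t.takeWhile (· ≠ ' ') ++ ' ' :: rest := by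
        conv_lhs => rw [← List.takeWhile_append_dropWhile (p := (· ≠ ' ')) (l := t)]
        rw [hdw]
      have htok : ' ' ∉ t.takeWhile (· ≠ ' ') := fun hm => by
        simpa using List.mem_takeWhile_imp hm
      have hrestlen : rest.length ≤ n := by
        have := congrArg List.length hsplit
        simp at this
        omega
      rw [hsplit, pvTokens_split htok]
      constructor
      · rintro ⟨a, b, hab⟩
        cases a with
        | nil =>
          simp only [List.nil_append, List.cons_append, List.cons.injEq, List.append_assoc] at hab
          have h2 : w ++ ' ' :: b = t.takeWhile (· ≠ ' ') ++ ' ' :: (rest ++ [' ']) := by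
            simpa using hab.2
          exact List.mem_cons.2 (Or.inl (pv_app_eq hw htok h2).1)
        | cons c a' =>
          simp only [List.cons_append, List.cons.injEq] at hab
          have h2 : a' ++ ' ' :: w ++ ' ' :: b = t.takeWhile (· ≠ ' ') ++ ' ' :: rest ++ [' '] := by
            simpa [List.append_assoc] using hab.2
          have := pv_rec a' (t.takeWhile (· ≠ ' ')) htok h2
          exact List.mem_cons.2 (Or.inr ((ih rest hrestlen).1 this))
      · intro hm
        rcases List.mem_cons.1 hm with rfl | hm
        · exact ⟨[], rest ++ [' '], by simp⟩
        · have hinf := (ih rest hrestlen).2 hm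
          have hsuf : (' ' :: rest ++ [' ']) <:+ (' ' :: (t.takeWhile (· ≠ ' ') ++ ' ' :: rest) ++ [' ']) :=
            ⟨' ' :: t.takeWhile (· ≠ ' '), by simp⟩
          exact hinf.trans hsuf.isInfix
    · rw [pvTokens_nospace hsp]
      simp only [List.mem_singleton]
      exact pv_key_nospace hw hsp

-- per-keyword: A's "kw.strip() in t and kw in ' t '" equals token membership of the bare keyword
theorem pv_perKw (w t : List Char) (hw : ' ' ∉ w)
    (hstrip : PySem.Chars.strip (' ' :: w ++ [' ']) = w) :
    (PySem.Chars.isIn (PySem.Chars.strip (' ' :: w ++ [' '])) t &&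
      PySem.Chars.isIn (' ' :: w ++ [' ']) ([' '] ++ t ++ [' '])) =
      (pvTokens t).contains w := by
  rw [hstrip]
  have hpad : ([' '] ++ t ++ [' ']) = ' ' :: t ++ [' '] := rfl
  rw [hpad]
  apply Bool.eq_iff_iff.mpr
  constructor
  · intro h
    simp only [Bool.and_eq_true] at h
    have hinf := (PySem.Chars.isIn_iff_infix _ _).1 h.2
    have hm := (pv_key w hw t.length t le_rfl).1 hinf
    simpa [List.contains_iff_mem] using hm
  · intro h
    have hm : w ∈ pvTokens t := by simpa [List.contains_iff_mem] using h
    have h2 := (PySem.Chars.isIn_iff_infix _ _).2 ((pv_key w hw t.length t le_rfl).2 hm)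
    have h1 := (PySem.Chars.isIn_iff_infix _ _).2 (pvTokens_mem_infix hm)
    simp only [Bool.and_eq_true]
    exact ⟨h1, h2⟩

-- B's scan equals testing every token of pvTokens (the first token extended by the accumulator)
theorem pvScan_tokens (t : List Char) : ∀ word,
    pvScan (t ++ [' ']) word =
      ((word.reverse ++ (pvTokens t).headI) :: (pvTokens t).tail).any
        (fun tok => PySem.Set.contains pvKwSet tok) := by
  induction t with
  | nil =>
    intro word
    simp [pvScan, pvTokens]
  | cons c rest ih =>
    intro word
    by_cases hc : c = ' '
    · subst hc
      obtain ⟨hh, ts, htk⟩ := List.exists_cons_of_ne_nil (pvTokens_ne_nil rest)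
      simp only [List.cons_append, pvScan, pvTokens, reduceIte]
      rw [ih [], htk]
      cases hb : PySem.Set.contains pvKwSet word.reverse
      · simp only [hb, Bool.false_eq_true, reduceIte, List.any_cons, List.headI, List.tail_cons,
          List.reverse_nil, List.nil_append, List.append_nil, Bool.false_or]
      · simp only [hb, reduceIte, List.any_cons, List.headI, List.tail_cons,
          List.reverse_nil, List.nil_append, List.append_nil, Bool.true_or]
    · obtain ⟨hh, ts, htk⟩ := List.exists_cons_of_ne_nil (pvTokens_ne_nil rest)
      simp only [List.cons_append, pvScan, if_neg hc]
      rw [ih (c :: word)]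
      simp [pvTokens, hc, htk]

-- ===== VERDICT (by name: the statement is the Claim_ definition above) =====
theorem needs_parens_py_spec : Claim_equal_needs_parens_py := by
  intro txt _
  unfold Spec_needs_parens_py needs_parens_py needs_parens_py_alt
  dsimp only []
  set t := PySem.Chars.strip txt.toList with ht
  by_cases h1 : (PySem.Chars.startswith t "(".toList && PySem.Chars.endswith t ")".toList) = true
  · rw [if_pos (by simp only [Bool.or_eq_true]; exact Or.inl (Or.inl h1)), if_pos h1]
  · by_cases h2 : t = "Thing".toList
    · rw [if_pos (by simp only [Bool.or_eq_true, beq_iff_eq]; exact Or.inl (Or.inr h2)),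
          if_neg h1, if_pos (by simpa using h2)]
    · by_cases h3 : t = "Nothing".toList
      · rw [if_pos (by simp only [Bool.or_eq_true, beq_iff_eq]; exact Or.inr h3),
          if_neg h1, if_neg (by simpa using h2), if_pos (by simpa using h3)]
      · have hA : ¬ ((PySem.Chars.startswith t "(".toList && PySem.Chars.endswith t ")".toList)
            || t == "Thing".toList || t == "Nothing".toList) = true := by
          simp only [Bool.or_eq_true, beq_iff_eq]
          rintro ((hc | hT) | hN)
          · exact h1 hc
          · exact h2 hT
          · exact h3 hN
        rw [if_neg hA, if_neg h1, if_neg (by simpa using h2), if_neg (by simpa using h3)]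
        rw [pvScan_tokens t []]
        obtain ⟨hh, ts, htk⟩ := List.exists_cons_of_ne_nil (pvTokens_ne_nil t)
        simp only [List.reverse_nil, List.nil_append, htk, List.headI, List.tail]
        have hany : ((hh :: ts).any fun tok => PySem.Set.contains pvKwSet tok)
            = ((pvTokens t).any fun tok => PySem.Set.contains pvKwSet tok) := by rw [htk]
        rw [hany]
        simp only [pvKwsA, List.any_cons, List.any_nil, Bool.or_false]
        have e0 : " and ".toList = ' ' :: "and".toList ++ [' '] := by decide
        have e1 : " or ".toList = ' ' :: "or".toList ++ [' '] := by decide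
        have e2 : " not ".toList = ' ' :: "not".toList ++ [' '] := by decide
        have e3 : " some ".toList = ' ' :: "some".toList ++ [' '] := by decide
        have e4 : " only ".toList = ' ' :: "only".toList ++ [' '] := by decide
        have e5 : " value ".toList = ' ' :: "value".toList ++ [' '] := by decide
        have e6 : " min ".toList = ' ' :: "min".toList ++ [' '] := by decide
        have e7 : " max ".toList = ' ' :: "max".toList ++ [' '] := by decide
        have e8 : " exactly ".toList = ' ' :: "exactly".toList ++ [' '] := by decide
        rw [e0, e1, e2, e3, e4, e5, e6, e7, e8]
        rw [pv_perKw "and".toList t (by decide) (by decide),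
            pv_perKw "or".toList t (by decide) (by decide),
            pv_perKw "not".toList t (by decide) (by decide),
            pv_perKw "some".toList t (by decide) (by decide),
            pv_perKw "only".toList t (by decide) (by decide),
            pv_perKw "value".toList t (by decide) (by decide),
            pv_perKw "min".toList t (by decide) (by decide),
            pv_perKw "max".toList t (by decide) (by decide),
            pv_perKw "exactly".toList t (by decide) (by decide)]
        apply Bool.eq_iff_iff.mpr
        have hset : pvKwSet =
            ["and".toList, "or".toList, "not".toList, "some".toList, "only".toList,
             "value".toList, "min".toList, "max".toList, "exactly".toList] := by decide
        simp only [Bool.or_eq_true, List.contains_iff_mem, List.any_eq_true, hset,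
          PySem.Set.contains, List.contains_iff_mem, List.mem_cons, List.not_mem_nil, or_false]
        constructor
        · rintro (h|h|h|h|h|h|h|h|h) <;> exact ⟨_, h, by decide⟩
        · rintro ⟨tok, htokmem, hkw⟩
          rcases hkw with rfl|rfl|rfl|rfl|rfl|rfl|rfl|rfl|rfl
          · exact Or.inl htokmem
          · exact Or.inr (Or.inl htokmem)
          · exact Or.inr (Or.inr (Or.inl htokmem))
          · exact Or.inr (Or.inr (Or.inr (Or.inl htokmem)))
          · exact Or.inr (Or.inr (Or.inr (Or.inr (Or.inl htokmem))))
          · exact Or.inr (Or.inr (Or.inr (Or.inr (Or.inr (Or.inl htokmem)))))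
          · exact Or.inr (Or.inr (Or.inr (Or.inr (Or.inr (Or.inr (Or.inl htokmem))))))
          · exact Or.inr (Or.inr (Or.inr (Or.inr (Or.inr (Or.inr (Or.inr (Or.inl htokmem)))))))
          · exact Or.inr (Or.inr (Or.inr (Or.inr (Or.inr (Or.inr (Or.inr (Or.inr htokmem)))))))
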